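-- pv_equiv track=rewrite | github.com/Quleran/DataAnalysis | Lab 1/F.py | find_min_number
-- ===== SOURCE A (Python) =====
-- def find_min_number(n, s):
--     if s < 1 or s > 9 * n:
--         return "NO"
--
--     digits = [0] * n
--
--     digits[0] = 1
--     remaining = s - 1
--
--
--     for i in range(n - 1, 0, -1):
--         if remaining <= 0:
--             break
--         add = min(remaining, 9 - digits[i])
--         digits[i] += add
--         remaining -= add
--
--     if remaining > 0:
--         digits[0] += remaining
--
--     return ''.join(str(d) for d in digits)
-- ===== SOURCE B (Python) =====
-- def find_min_number(n, s):
--     if s < 1 or s > 9 * n: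
--         return "NO"
--     r = s - 1
--     nines, rem = divmod(r, 9)
--     if nines == n - 1 and rem > 0:
--         return str(1 + rem) + "9" * nines
--     zeros = n - 1 - nines - (1 if rem > 0 else 0)
--     return "1" + "0" * zeros + (str(rem) if rem > 0 else "") + "9" * nines
-- ===== Notes on version B (the rewrite author's own statement) =====
-- stated objective: faster
-- what changed: A fills a digit array right-to-left in a Python loop handing out min(remaining,9) per position and then joins per-digit str() calls; B computes the answer in closed form from divmod(s-1, 9) (count of trailing nines, the middle digit, the zero padding) and builds the string with string repetition, with no digit array, no per-digit loop and no per-digit str()/join.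
import Mathlib
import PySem

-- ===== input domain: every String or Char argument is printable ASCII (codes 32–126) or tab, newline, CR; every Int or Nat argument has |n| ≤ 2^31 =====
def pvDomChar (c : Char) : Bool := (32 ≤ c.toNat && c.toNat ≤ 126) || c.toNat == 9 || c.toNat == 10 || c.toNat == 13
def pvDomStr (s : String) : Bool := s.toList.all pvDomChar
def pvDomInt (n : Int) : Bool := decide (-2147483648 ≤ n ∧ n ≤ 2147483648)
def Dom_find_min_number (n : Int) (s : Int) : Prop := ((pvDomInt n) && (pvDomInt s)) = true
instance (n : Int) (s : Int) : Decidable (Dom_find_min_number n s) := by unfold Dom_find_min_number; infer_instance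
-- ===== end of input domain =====

-- B replaces A's right-to-left per-digit greedy filling loop by a closed form from divmod(s-1, 9), building the string from repeated pieces (measured faster in a timing run).

-- ===== PORT A =====
-- the for-loop over range(n-1, 0, -1) with its `break`, as structural recursion on the range list
def findMinLoopA : List Int → List Int → Int → List Int × Int
  | [], digits, remaining => (digits, remaining)
  | i :: rest, digits, remaining =>
    if remaining ≤ 0 then (digits, remaining)
    else
      let add := min remaining (9 - PySem.List.pyGetD digits i 0)
      findMinLoopA rest (PySem.List.pySetD digits i (PySem.List.pyGetD digits i 0 + add)) (remaining - add)

def find_min_number (n : Int) (s : Int) : String :=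
  if s < 1 ∨ s > 9 * n then "NO"
  else
    let digits0 := PySem.List.pySetD (List.replicate n.toNat (0 : Int)) 0 1
    let res := findMinLoopA (PySem.List.pyRange (n - 1) 0 (-1)) digits0 (s - 1)
    let digits := if res.2 > 0 then PySem.List.pySetD res.1 0 (PySem.List.pyGetD res.1 0 0 + res.2) else res.1
    PySem.Str.join "" (digits.map PySem.Int.toStr)

-- ===== PORT B =====
def find_min_number_alt (n : Int) (s : Int) : String :=
  if s < 1 ∨ s > 9 * n then "NO"
  else
    let r := s - 1
    let nines := PySem.Int.floordiv r 9
    let rem := PySem.Int.mod r 9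
    if nines = n - 1 ∧ rem > 0 then
      PySem.Int.toStr (1 + rem) ++ String.ofList (List.replicate nines.toNat '9')
    else
      let zeros := n - 1 - nines - (if rem > 0 then 1 else 0)
      "1" ++ String.ofList (List.replicate zeros.toNat '0') ++
        (if rem > 0 then PySem.Int.toStr rem else "") ++
        String.ofList (List.replicate nines.toNat '9')

-- ===== PRECONDITION & SPEC =====
def Spec_find_min_number (n : Int) (s : Int) (out : String) : Prop := out = find_min_number_alt n s
instance (n : Int) (s : Int) (out : String) : Decidable (Spec_find_min_number n s out) := by unfold Spec_find_min_number; infer_instance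

-- ===== CLAIM (what is proved, stated in full; the proofs are below) =====
def Claim_equal_find_min_number : Prop := ∀ (n : Int) (s : Int), Dom_find_min_number n s → Spec_find_min_number n s (find_min_number n s)

-- ===== LEMMAS AND PROOFS =====

-- what A's loop leaves at positions 1..m (right to left), for remaining = r
def pvTail (m r : Nat) : List Int :=
  if 9 * m ≤ r then List.replicate m (9 : Int)
  else List.replicate (m - r / 9 - (if r % 9 = 0 then 0 else 1)) (0 : Int)
       ++ (if r % 9 = 0 then [] else [((r % 9 : Nat) : Int)])
       ++ List.replicate (r / 9) (9 : Int)

lemma loop_zero (l : List Int) (digits : List Int) : findMinLoopA l digits 0 = (digits, 0) := by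
  cases l <;> simp [findMinLoopA]

lemma set_at_len {α : Type} (xs : List α) (y : α) (ys : List α) (v : α) (k : Nat) (hk : k = xs.length) :
    (xs ++ y :: ys).set k v = xs ++ v :: ys := by
  subst hk
  induction xs with
  | nil => rfl
  | cons a t ih => simp [ih]

lemma pvTail_step (m r : Nat) (h : 9 ≤ r) :
    pvTail m (r - 9) ++ [(9 : Int)] = pvTail (m + 1) r := by
  have h1 : (r - 9) / 9 = r / 9 - 1 := by omega
  have h2 : (r - 9) % 9 = r % 9 := by omega
  have h3 : 1 ≤ r / 9 := by omega
  unfold pvTail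
  rw [h1, h2]
  by_cases hb : 9 * (m + 1) ≤ r
  · rw [if_pos (by omega), if_pos hb, ← List.replicate_succ']
  · rw [if_neg (by omega), if_neg hb]
    simp only [List.append_assoc]
    congr 1
    · congr 1; omega
    congr 1
    rw [← List.replicate_succ']
    congr 1
    omega

lemma loop_spec (m r : Nat) (d0 : Int) (suffix : List Int) :
    findMinLoopA (PySem.List.pyRange (m : Int) 0 (-1)) (d0 :: (List.replicate m (0 : Int) ++ suffix)) (r : Int)
    = (d0 :: (pvTail m r ++ suffix), ((r - 9 * m : Nat) : Int)) := by
  induction m generalizing r suffix with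
  | zero =>
    simp [PySem.List.pyRange_neg_one_eq_nil, findMinLoopA, pvTail]
  | succ m ih =>
    have hcons : PySem.List.pyRange ((m + 1 : Nat) : Int) 0 (-1)
        = ((m + 1 : Nat) : Int) :: PySem.List.pyRange (((m + 1 : Nat) : Int) - 1) 0 (-1) :=
      PySem.List.pyRange_neg_one_cons (by positivity)
    have hm1 : ((m + 1 : Nat) : Int) - 1 = (m : Int) := by push_cast; ring
    rw [hcons, hm1]
    rcases Nat.eq_zero_or_pos r with hr | hr
    · subst hr
      simp only [findMinLoopA, Nat.cast_zero]
      rw [if_pos le_rfl]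
      have : pvTail (m + 1) 0 = List.replicate (m + 1) (0 : Int) := by
        unfold pvTail
        rw [if_neg (by omega)]
        simp
      rw [this]
      simp
    · -- remaining = r > 0
      have hrne : r ≠ 0 := Nat.pos_iff_ne_zero.mp hr
      have hget : PySem.List.pyGetD (d0 :: (List.replicate (m + 1) (0 : Int) ++ suffix)) ((m + 1 : Nat) : Int) 0 = 0 := by
        rw [PySem.List.pyGetD_natCast]
        simp [List.getD, List.getElem?_append_left, List.getElem?_replicate, Nat.lt_succ_self]
      have hshape : List.replicate (m + 1) (0 : Int) ++ suffix
          = List.replicate m (0 : Int) ++ (0 : Int) :: suffix := by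
        rw [List.replicate_succ', List.append_assoc]; rfl
      have hset : PySem.List.pySetD (d0 :: (List.replicate (m + 1) (0 : Int) ++ suffix)) ((m + 1 : Nat) : Int) (0 + min (r : Int) 9)
          = d0 :: (List.replicate m (0 : Int) ++ (0 + min (r : Int) 9) :: suffix) := by
        rw [PySem.List.pySetD_natCast]
        rw [hshape]
        have : (d0 :: (List.replicate m (0 : Int) ++ (0 : Int) :: suffix)).set (m + 1) (0 + min (r : Int) 9)
            = d0 :: ((List.replicate m (0 : Int) ++ (0 : Int) :: suffix).set m (0 + min (r : Int) 9)) := rfl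
        rw [this]
        rw [set_at_len _ _ _ _ m (by simp)]
      simp only [findMinLoopA]
      rw [if_neg (by push_cast; omega), hget]
      have h9 : (9 : Int) - 0 = 9 := by ring
      rw [h9, hset]
      by_cases hge : 9 ≤ r
      · have hmin : min (r : Int) 9 = 9 := by omega
        have hval : (0 : Int) + min (r : Int) 9 = ((9 : Nat) : Int) := by rw [hmin]; norm_num
        have hrem : (r : Int) - min (r : Int) 9 = ((r - 9 : Nat) : Int) := by rw [hmin]; omega
        rw [hval, hrem]
        have := ih (r - 9) (((9 : Nat) : Int) :: suffix)
        rw [this, Prod.mk.injEq]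
        refine ⟨?_, ?_⟩
        · congr 1
          rw [show ((9 : Nat) : Int) :: suffix = [(9 : Int)] ++ suffix by push_cast; rfl,
            ← List.append_assoc, pvTail_step m r hge]
        · congr 1; omega
      · have hmin : min (r : Int) 9 = (r : Int) := by omega
        have hrem : (r : Int) - min (r : Int) 9 = 0 := by rw [hmin]; ring
        rw [hrem, loop_zero, Prod.mk.injEq]
        refine ⟨?_, ?_⟩
        · congr 1
          have : pvTail (m + 1) r = List.replicate m (0 : Int) ++ [((r % 9 : Nat) : Int)] := by
            unfold pvTail
            have h0 : r / 9 = 0 := by omega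
            have h1 : r % 9 = r := by omega
            rw [if_neg (show ¬ 9 * (m + 1) ≤ r by omega), h0, h1, if_neg hrne]
            simp [hrne]
          rw [this, List.append_assoc]
          have : ((r % 9 : Nat) : Int) = 0 + min (r : Int) 9 := by
            rw [hmin]; push_cast; omega
          rw [← this]
          rfl
        · omega

lemma toChars_digit (d : Int) (h0 : 0 ≤ d) (h9 : d ≤ 9) :
    PySem.Int.toChars d = [Char.ofNat (48 + d.toNat)] := by
  interval_cases d <;> decide

lemma join_digits (l : List Int) (h : ∀ d ∈ l, 0 ≤ d ∧ d ≤ 9) :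
    (PySem.Str.join "" (l.map PySem.Int.toStr)).toList
      = l.map (fun d => Char.ofNat (48 + d.toNat)) := by
  rw [PySem.Str.toList_join]
  have hmaps : (l.map PySem.Int.toStr).map String.toList
      = (l.map (fun d => Char.ofNat (48 + d.toNat))).map (fun c => [c]) := by
    rw [List.map_map, List.map_map]
    apply List.map_congr_left
    intro d hd
    have := h d hd
    simp only [Function.comp]
    rw [PySem.Int.toList_toStr, toChars_digit d this.1 this.2]
  rw [hmaps]
  have : ("" : String).toList = ([] : List Char) := rfl
  rw [this, PySem.Chars.join_nil_singletons]

-- ===== VERDICT (by name: the statement is the Claim_ definition above) =====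
lemma pvTail_mem (m r : Nat) {d : Int} (h : d ∈ pvTail m r) : 0 ≤ d ∧ d ≤ 9 := by
  unfold pvTail at h
  split_ifs at h with h1 h2 <;>
    simp only [List.mem_append, List.mem_replicate, List.mem_singleton, List.not_mem_nil,
      or_false, false_or] at h <;>
    omega

theorem find_min_number_spec : Claim_equal_find_min_number := by
  intro n s _hdom
  unfold Spec_find_min_number find_min_number find_min_number_alt
  by_cases hno : s < 1 ∨ s > 9 * n
  · rw [if_pos hno, if_pos hno]
  · rw [if_neg hno, if_neg hno]
    dsimp only
    push_neg at hno
    obtain ⟨hs1, hs9⟩ := hno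
    have hn1 : 1 ≤ n := by nlinarith
    -- name the Nat versions
    set N : Nat := (n - 1).toNat with hN
    set R : Nat := (s - 1).toNat with hR
    have hnN : n - 1 = (N : Int) := by omega
    have hsR : s - 1 = (R : Int) := by omega
    have hRle : R ≤ 9 * N + 8 := by omega
    have hnat : n.toNat = N + 1 := by omega
    -- initial digits
    have hdig0 : PySem.List.pySetD (List.replicate n.toNat (0 : Int)) 0 1
        = (1 : Int) :: (List.replicate N (0 : Int) ++ []) := by
      rw [show ((0:Int)) = ((0:Nat):Int) by norm_num, PySem.List.pySetD_natCast, hnat,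
        List.replicate_succ]
      simp
    rw [hdig0, hnN, hsR, loop_spec]
    dsimp only
    -- floordiv / mod facts
    have hfd : PySem.Int.floordiv ((R : Nat) : Int) 9 = ((R / 9 : Nat) : Int) := by
      exact_mod_cast PySem.Int.floordiv_natCast R 9
    have hmd : PySem.Int.mod ((R : Nat) : Int) 9 = ((R % 9 : Nat) : Int) := by
      exact_mod_cast PySem.Int.mod_natCast R 9
    rw [hfd, hmd]
    by_cases hlft : 9 * N < R
    · -- leftover: digits[0] gets the rest; B's first branch
      have hres2 : (0 : Int) < ((R - 9 * N : Nat) : Int) := by omega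
      rw [if_pos hres2]
      have hdivN : R / 9 = N := by omega
      have hmodpos : 0 < R % 9 := by omega
      have hmodval : R % 9 = R - 9 * N := by omega
      rw [if_pos ⟨by exact_mod_cast hdivN, by exact_mod_cast hmodpos⟩]
      have htail : pvTail N R = List.replicate N (9 : Int) := by
        unfold pvTail; rw [if_pos (by omega)]
      have hget0 : PySem.List.pyGetD ((1 : Int) :: (pvTail N R ++ [])) 0 0 = 1 := by
        simp [PySem.List.pyGetD_zero_cons]
      rw [hget0]
      have hset0 : PySem.List.pySetD ((1 : Int) :: (pvTail N R ++ [])) 0 (1 + ((R - 9 * N : Nat) : Int))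
          = (1 + ((R - 9 * N : Nat) : Int)) :: (pvTail N R ++ []) := by
        rw [show ((0:Int)) = ((0:Nat):Int) by norm_num, PySem.List.pySetD_natCast]; rfl
      rw [hset0, htail]
      -- string equality via toList
      have c9 : Char.ofNat (48 + (9 : Int).toNat) = '9' := by decide
      apply String.toList_injective
      rw [join_digits]
      · rw [String.toList_append, PySem.Int.toList_toStr]
        have hd2 : (1 : Int) + ((R % 9 : Nat) : Int) = 1 + ((R - 9 * N : Nat) : Int) := by omega
        rw [hd2, toChars_digit _ (by omega) (by omega)]
        simp [hdivN, c9, List.map_replicate, String.toList_ofList]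
      · intro d hd
        simp at hd
        rcases hd with hd | hd
        · omega
        · omega
    · -- no leftover: loop ends with remaining 0; B's else branch
      have hres2 : ¬ ((0 : Int) < ((R - 9 * N : Nat) : Int)) := by omega
      rw [if_neg hres2]
      have hcond : ¬ (((R / 9 : Nat) : Int) = ((N : Nat) : Int) ∧ ((R % 9 : Nat) : Int) > 0) := by
        rintro ⟨h1, h2⟩
        have hq : R / 9 = N := by exact_mod_cast h1
        have hm : 0 < R % 9 := by exact_mod_cast h2
        omega
      rw [if_neg hcond]
      apply String.toList_injective
      rw [join_digits]
      · simp only [String.toList_append]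
        have h1 : ("1" : String).toList = ['1'] := rfl
        rw [h1]
        have hz : (((N : Nat) : Int) - ((R / 9 : Nat) : Int) - if ((R % 9 : Nat) : Int) > 0 then 1 else 0).toNat
            = N - R / 9 - (if R % 9 = 0 then 0 else 1) := by
          by_cases hm : R % 9 = 0
          · rw [if_neg (show ¬ ((R % 9 : Nat) : Int) > 0 by exact_mod_cast (by omega : ¬ (0:Int) < ((R % 9 : Nat):Int))), if_pos hm]
            omega
          · rw [if_pos (show ((R % 9 : Nat) : Int) > 0 by exact_mod_cast (by omega : (0:Int) < ((R % 9 : Nat):Int))), if_neg hm]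
            omega
        rw [hz]
        have c0 : Char.ofNat (48 + (0 : Int).toNat) = '0' := by decide
        have c1 : Char.ofNat (48 + (1 : Int).toNat) = '1' := by decide
        have c9 : Char.ofNat (48 + (9 : Int).toNat) = '9' := by decide
        unfold pvTail
        rcases Nat.lt_or_ge R (9 * N) with hlt | hge
        · by_cases hm : R % 9 = 0
          · rw [if_neg (show ¬ 9 * N ≤ R by omega), if_pos hm,
              if_neg (show ¬ ((R % 9 : Nat) : Int) > 0 by simp [hm])]
            simp [hm, c0, c1, c9, List.map_replicate, String.toList_ofList]
            try omega
          · rw [if_neg (show ¬ 9 * N ≤ R by omega), if_neg hm,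
              if_pos (show ((R % 9 : Nat) : Int) > 0 by exact_mod_cast Nat.pos_of_ne_zero hm),
              PySem.Int.toList_toStr, toChars_digit _ (by omega) (by omega)]
            simp [hm, c0, c1, c9, List.map_replicate, String.toList_ofList]
            try omega
        · have hReq : R = 9 * N := by omega
          have hm : R % 9 = 0 := by omega
          have hdq : R / 9 = N := by omega
          rw [if_pos (show 9 * N ≤ R by omega), if_pos hm,
            if_neg (show ¬ ((R % 9 : Nat) : Int) > 0 by simp [hm])]
          simp [hm, hdq, c0, c1, c9, List.map_replicate, String.toList_ofList]
          try omega
      · intro d hd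
        simp at hd
        rcases hd with hd | hd
        · omega
        · exact pvTail_mem N R hd
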